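-- pv_equiv track=rewrite | github.com/posos-tech/multilingual-alignment-and-transfer | multilingual_eval/datasets/realignment_dataset.py | add_identical_expressions
-- ===== SOURCE A (Python) =====
-- def add_identical_expressions(left_multi, left_multi_pos, right_multi, right_multi_pos):
--     """
--     Add identical expression found in both sentences
--     """
--     new_aligned_left_multi_pos = []
--     new_aligned_right_multi_pos = []
--     for (left_start, left_end), left_expression in zip(left_multi_pos, left_multi):
--         for (right_start, right_end), right_expression in zip(right_multi_pos, right_multi):
--             if left_expression == right_expression:
--                 new_aligned_left_multi_pos.append([left_start, left_end])
--                 new_aligned_right_multi_pos.append([right_start, right_end])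
--     return new_aligned_left_multi_pos, new_aligned_right_multi_pos
-- ===== SOURCE B (Python) =====
-- def add_identical_expressions(left_multi, left_multi_pos, right_multi, right_multi_pos):
--     """
--     Add identical expression found in both sentences
--     (hash-index variant: index right expressions once, then one pass over the left)
--     """
--     index = {}
--     for (right_start, right_end), right_expression in zip(right_multi_pos, right_multi):
--         index.setdefault(right_expression, []).append([right_start, right_end])
--     new_aligned_left_multi_pos = []
--     new_aligned_right_multi_pos = []
--     for (left_start, left_end), left_expression in zip(left_multi_pos, left_multi):
--         matches = index.get(left_expression, [])
--         new_aligned_left_multi_pos.extend([left_start, left_end] for _ in matches)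
--         new_aligned_right_multi_pos.extend(matches)
--     return new_aligned_left_multi_pos, new_aligned_right_multi_pos
-- ===== Notes on version B (the rewrite author's own statement) =====
-- stated objective: alternative
-- what changed: Replaces the nested left-by-right scan with a dict indexing right expressions to their position lists built in one pass, then a single pass over the left expressions; the inner scan disappears.
import Mathlib
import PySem

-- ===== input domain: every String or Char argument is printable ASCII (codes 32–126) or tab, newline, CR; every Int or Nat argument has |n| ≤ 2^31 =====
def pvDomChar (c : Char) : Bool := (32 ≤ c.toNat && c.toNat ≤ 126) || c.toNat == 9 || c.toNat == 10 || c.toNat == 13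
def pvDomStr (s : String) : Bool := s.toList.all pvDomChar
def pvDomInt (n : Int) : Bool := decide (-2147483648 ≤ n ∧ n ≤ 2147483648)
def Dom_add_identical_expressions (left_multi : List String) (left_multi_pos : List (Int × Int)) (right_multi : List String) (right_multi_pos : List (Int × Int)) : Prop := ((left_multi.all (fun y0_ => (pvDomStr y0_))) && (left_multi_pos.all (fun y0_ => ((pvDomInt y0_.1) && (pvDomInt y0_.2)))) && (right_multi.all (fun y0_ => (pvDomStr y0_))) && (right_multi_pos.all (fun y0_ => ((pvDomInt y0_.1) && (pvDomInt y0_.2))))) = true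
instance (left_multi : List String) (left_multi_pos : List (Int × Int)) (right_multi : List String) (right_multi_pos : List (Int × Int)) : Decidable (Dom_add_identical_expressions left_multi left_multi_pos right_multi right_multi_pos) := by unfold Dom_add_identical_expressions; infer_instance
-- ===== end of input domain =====

-- B replaces A's nested left×right scan with a dict indexing the right expressions
-- (expression → list of its positions) built once, then a single pass over the left.

-- ===== PORT A =====
-- nested loops: for each left entry, scan all right entries and append matching pairs
def add_identical_expressions (left_multi : List String) (left_multi_pos : List (Int × Int)) (right_multi : List String) (right_multi_pos : List (Int × Int)) : List (List Int) × List (List Int) :=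
  (left_multi_pos.zip left_multi).foldl (fun acc l =>
    (right_multi_pos.zip right_multi).foldl (fun acc2 r =>
      if l.2 == r.2 then (acc2.1 ++ [[l.1.1, l.1.2]], acc2.2 ++ [[r.1.1, r.1.2]]) else acc2)
      acc)
    ([], [])

-- ===== PORT B =====
-- Source B: index[expr].append([start, end]) over the right side (setdefault-append = Dict.modify with default []),
-- then one pass over the left side extending with index.get(expr, [])
def add_identical_expressions_alt (left_multi : List String) (left_multi_pos : List (Int × Int)) (right_multi : List String) (right_multi_pos : List (Int × Int)) : List (List Int) × List (List Int) :=
  let index : PySem.Dict String (List (List Int)) :=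
    (right_multi_pos.zip right_multi).foldl
      (fun d r => d.modify r.2 [] (fun v => v ++ [[r.1.1, r.1.2]])) PySem.Dict.empty
  (left_multi_pos.zip left_multi).foldl (fun acc l =>
    let ms := index.getD l.2 []
    (acc.1 ++ ms.map (fun _ => [l.1.1, l.1.2]), acc.2 ++ ms))
    ([], [])

-- ===== PRECONDITION & SPEC =====
def Spec_add_identical_expressions (left_multi : List String) (left_multi_pos : List (Int × Int)) (right_multi : List String) (right_multi_pos : List (Int × Int)) (out : List (List Int) × List (List Int)) : Prop := out = add_identical_expressions_alt left_multi left_multi_pos right_multi right_multi_pos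
instance (left_multi : List String) (left_multi_pos : List (Int × Int)) (right_multi : List String) (right_multi_pos : List (Int × Int)) (out : List (List Int) × List (List Int)) : Decidable (Spec_add_identical_expressions left_multi left_multi_pos right_multi right_multi_pos out) := by unfold Spec_add_identical_expressions; infer_instance

-- ===== CLAIM (what is proved, stated in full; the proofs are below) =====
def Claim_equal_add_identical_expressions : Prop := ∀ (left_multi : List String) (left_multi_pos : List (Int × Int)) (right_multi : List String) (right_multi_pos : List (Int × Int)), Dom_add_identical_expressions left_multi left_multi_pos right_multi right_multi_pos → Spec_add_identical_expressions left_multi left_multi_pos right_multi right_multi_pos (add_identical_expressions left_multi left_multi_pos right_multi right_multi_pos)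

-- ===== LEMMAS AND PROOFS =====

-- the index after processing rs maps e to d's entry followed by the positions of rs-entries whose expression is e
theorem index_getD (rs : List ((Int × Int) × String)) (d : PySem.Dict String (List (List Int))) (e : String) :
    (rs.foldl (fun d r => d.modify r.2 [] (fun v => v ++ [[r.1.1, r.1.2]])) d).getD e []
      = d.getD e [] ++ (rs.filter (fun r => e == r.2)).map (fun r => [r.1.1, r.1.2]) := by
  induction rs generalizing d with
  | nil => simp
  | cons r rs ih =>
    simp only [List.foldl_cons, ih, List.filter_cons]
    by_cases h : e = r.2
    · subst h
      simp [PySem.Dict.getD_modify_self]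
    · rw [PySem.Dict.getD_modify_of_ne _ _ _ h]
      simp [beq_iff_eq, h]

-- A's inner scan over the right entries appends exactly the matching pairs
theorem inner_loop (rs : List ((Int × Int) × String)) (e : String) (L : List Int)
    (acc : List (List Int) × List (List Int)) :
    (rs.foldl (fun acc2 r =>
        if e == r.2 then (acc2.1 ++ [L], acc2.2 ++ [[r.1.1, r.1.2]]) else acc2) acc)
      = (acc.1 ++ ((rs.filter (fun r => e == r.2)).map (fun r => [r.1.1, r.1.2])).map (fun _ => L),
         acc.2 ++ (rs.filter (fun r => e == r.2)).map (fun r => [r.1.1, r.1.2])) := by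
  induction rs generalizing acc with
  | nil => simp
  | cons r rs ih =>
    simp only [List.foldl_cons, List.filter_cons]
    by_cases h : (e == r.2) = true
    · rw [if_pos h, if_pos h, ih]; simp
    · rw [if_neg h, if_neg h, ih]

-- the two outer passes agree for any accumulator
theorem outer_loop (ls rs : List ((Int × Int) × String)) (acc : List (List Int) × List (List Int)) :
    (ls.foldl (fun acc l =>
        rs.foldl (fun acc2 r =>
          if l.2 == r.2 then (acc2.1 ++ [[l.1.1, l.1.2]], acc2.2 ++ [[r.1.1, r.1.2]]) else acc2) acc) acc)
      = (ls.foldl (fun acc l =>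
          let ms := (rs.foldl (fun d r => d.modify r.2 [] (fun v => v ++ [[r.1.1, r.1.2]]))
              (PySem.Dict.empty : PySem.Dict String (List (List Int)))).getD l.2 []
          (acc.1 ++ ms.map (fun _ => [l.1.1, l.1.2]), acc.2 ++ ms)) acc) := by
  induction ls generalizing acc with
  | nil => rfl
  | cons l ls ih =>
    simp only [List.foldl_cons]
    rw [inner_loop rs l.2 [l.1.1, l.1.2] acc, ih]
    simp [index_getD]

-- ===== VERDICT (by name: the statement is the Claim_ definition above) =====
theorem add_identical_expressions_spec : Claim_equal_add_identical_expressions := by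
  intro left_multi left_multi_pos right_multi right_multi_pos _
  unfold Spec_add_identical_expressions add_identical_expressions add_identical_expressions_alt
  exact outer_loop _ _ _
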